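-- pv_equiv track=rewrite | github.com/naqushab/ScalerAcademy | Scaler/Intermediate/Arrays - Subarrays/HW3.py | solve
-- ===== SOURCE A (Python) =====
-- def solve(A, B):
--     k = 2*B + 1
--     window_start = 0
--     window_end = 0
--     index_array = []
--     alternating_len = 0
--     if k == 1:
--         for i in range(len(A)):
--             index_array.append(i)
--         return index_array
--
--     while window_end < len(A)-1:
--         if A[window_end] ^ A[window_end+1] == 1:
--             alternating_len = window_end+1-window_start+1
--         else:
--             while alternating_len >= k:
--                 index_array.append(window_start+B)
--                 window_start += 1
--                 alternating_len -= 1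
--             window_start = window_end + 1
--         window_end += 1
--     while alternating_len >= k:
--         index_array.append(window_start+B)
--         window_start += 1
--         alternating_len -= 1
--     return index_array
-- ===== SOURCE B (Python) =====
-- def solve(A, B):
--     k = 2 * B + 1
--     if k == 1:
--         return list(range(len(A)))
--     n = len(A)
--     res = []
--     i = 0
--     while i < n:
--         j = i
--         while j + 1 < n and A[j] ^ A[j + 1] == 1:
--             j += 1
--         length = j - i + 1
--         if length >= k:
--             res.extend(range(i + B, i + B + (length - k + 1)))
--         i = j + 1
--     return res
-- ===== Notes on version B (the rewrite author's own statement) =====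
-- stated objective: alternative
-- what changed: Replaces the streaming sliding-window with inner flush loops by a two-level segment decomposition: scan each maximal alternating run once and emit its center indices with a single range per run.
-- outside the precondition, e.g. on solve([], -2): A returns [-2, -1, 0, 1], B returns []; on solve([5], -1): A returns [-1, 0], B returns [-1, 0, 1]
import Mathlib
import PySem

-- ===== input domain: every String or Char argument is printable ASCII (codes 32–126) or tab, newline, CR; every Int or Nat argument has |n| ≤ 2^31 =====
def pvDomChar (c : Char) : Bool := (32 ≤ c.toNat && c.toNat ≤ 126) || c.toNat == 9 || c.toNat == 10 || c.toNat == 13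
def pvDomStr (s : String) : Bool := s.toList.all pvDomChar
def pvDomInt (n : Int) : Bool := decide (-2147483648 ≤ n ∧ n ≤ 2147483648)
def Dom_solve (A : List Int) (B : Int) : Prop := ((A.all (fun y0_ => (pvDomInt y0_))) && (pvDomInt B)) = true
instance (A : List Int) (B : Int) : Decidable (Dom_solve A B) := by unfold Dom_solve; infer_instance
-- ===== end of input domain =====

-- B replaces A's streaming sliding-window with inner flush loops by an explicit
-- maximal-run decomposition emitting one index range per run (objective: alternative).


-- ===== PORT A =====
-- inner 'while alternating_len >= k' flush loop; returns (index_array, window_start, alternating_len)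
def flushA (B k : Int) (ws alt : Int) (acc : List Int) : List Int × Int × Int :=
  if _h : k ≤ alt then flushA B k (ws + 1) (alt - 1) (acc ++ [ws + B]) else (acc, ws, alt)
  termination_by (alt + 1 - k).toNat
  decreasing_by omega

-- outer 'while window_end < len(A)-1' loop; indices are in range in Python, so getD is exact
def loopA (A : List Int) (B k : Int) (we : Nat) (ws alt : Int) (acc : List Int) :
    List Int × Int × Int :=
  if h : we < A.length - 1 then
    if PySem.Int.bxor (A.getD we 0) (A.getD (we + 1) 0) == 1 then
      loopA A B k (we + 1) ws ((we : Int) + 1 - ws + 1) acc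
    else
      let r := flushA B k ws alt acc
      loopA A B k (we + 1) ((we : Int) + 1) r.2.2 r.1
  else (acc, ws, alt)
  termination_by A.length - we
  decreasing_by all_goals omega

def solve (A : List Int) (B : Int) : List Int :=
  let k := 2 * B + 1
  if k = 1 then
    (PySem.List.pyRange 0 (A.length : Int) 1).foldl (fun acc i => acc ++ [i]) []
  else
    let r := loopA A B k 0 0 0 []
    (flushA B k r.2.1 r.2.2 r.1).1

-- ===== PORT B =====
-- 'while j + 1 < n and A[j] ^ A[j+1] == 1: j += 1' — end index of the maximal run from j
def scanRun (A : List Int) (j : Nat) : Nat :=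
  if h1 : j + 1 < A.length then
    if PySem.Int.bxor (A.getD j 0) (A.getD (j + 1) 0) == 1 then scanRun A (j + 1) else j
  else j
  termination_by A.length - j
  decreasing_by omega

-- cited by runLoop's termination proof
theorem scanRun_ge_aux (A : List Int) : ∀ (d j : Nat), A.length - j ≤ d → j ≤ scanRun A j := by
  intro d
  induction d with
  | zero => intro j hj; rw [scanRun]; simp [show ¬ j + 1 < A.length by omega]
  | succ d ih =>
    intro j hj
    rw [scanRun]
    by_cases h1 : j + 1 < A.length
    · by_cases h2 : PySem.Int.bxor (A.getD j 0) (A.getD (j + 1) 0) == 1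
      · simp only [h1, dif_pos, h2, if_pos]
        have := ih (j + 1) (by omega); omega
      · rw [dif_pos h1, if_neg h2]
    · rw [dif_neg h1]

theorem scanRun_ge (A : List Int) (j : Nat) : j ≤ scanRun A j :=
  scanRun_ge_aux A A.length j (by omega)

-- 'while i < n' loop over maximal runs
def runLoop (A : List Int) (B k : Int) (i : Nat) (acc : List Int) : List Int :=
  if h : i < A.length then
    let j := scanRun A i
    let len : Int := (j : Int) - (i : Int) + 1
    let acc' := if k ≤ len then
        acc ++ PySem.List.pyRange ((i : Int) + B) ((i : Int) + B + (len - k + 1)) 1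
      else acc
    runLoop A B k (j + 1) acc'
  else acc
  termination_by A.length - i
  decreasing_by have := scanRun_ge A i; omega

def solve_alt (A : List Int) (B : Int) : List Int :=
  let k := 2 * B + 1
  if k = 1 then PySem.List.pyRange 0 (A.length : Int) 1
  else runLoop A B k 0 []

-- ===== PRECONDITION & SPEC =====
-- Pre_ restricts to the natural domain 0 ≤ B (B is a nonnegative half-window count);
-- for negative B the target length k = 2B+1 is negative and A's returned indices are
-- artefacts of leftover loop state, which B does not reproduce.
def Pre_solve (A : List Int) (B : Int) : Prop := 0 ≤ B
instance (A : List Int) (B : Int) : Decidable (Pre_solve A B) := by unfold Pre_solve; infer_instance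

def pvWitness_solve : List Int × Int := ([0, 1, 0, 1, 5], 1)

def Spec_solve (A : List Int) (B : Int) (out : List Int) : Prop := out = solve_alt A B
instance (A : List Int) (B : Int) (out : List Int) : Decidable (Spec_solve A B out) := by
  unfold Spec_solve; infer_instance

-- ===== CLAIM (what is proved, stated in full; the proofs are below) =====
def Claim_equal_solve : Prop :=
  ∀ (A : List Int) (B : Int), Dom_solve A B → Pre_solve A B → Spec_solve A B (solve A B)

-- ===== LEMMAS AND PROOFS =====

theorem flushA_lt (B k ws alt : Int) (acc : List Int) (h : alt < k) :
    flushA B k ws alt acc = (acc, ws, alt) := by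
  rw [flushA]; simp [show ¬ k ≤ alt by omega]

theorem flushA_ge_aux (B k : Int) : ∀ (n : Nat) (ws alt : Int) (acc : List Int),
    alt ≤ k + (n : Int) → k ≤ alt →
    flushA B k ws alt acc =
      (acc ++ PySem.List.pyRange (ws + B) (ws + B + (alt - k + 1)) 1,
        ws + (alt - k + 1), k - 1) := by
  intro n
  induction n with
  | zero =>
    intro ws alt acc hn hk
    rw [flushA, dif_pos hk, flushA_lt _ _ _ _ _ (by omega),
      show alt - k + 1 = 1 by omega, show ws + B + 1 = (ws + B) + 1 by ring,
      PySem.List.pyRange_one_singleton]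
    (simp; omega)
  | succ n ih =>
    intro ws alt acc hn hk
    by_cases h2 : k ≤ alt - 1
    · rw [flushA, dif_pos hk, ih (ws + 1) (alt - 1) _ (by omega) h2,
        show ws + 1 + B = ws + B + 1 by ring,
        show ws + B + 1 + (alt - 1 - k + 1) = ws + B + (alt - k + 1) by ring,
        Prod.mk.injEq, Prod.mk.injEq]
      refine ⟨?_, by omega, rfl⟩
      rw [List.append_assoc, List.singleton_append,
        ← PySem.List.pyRange_one_cons (by omega)]
    · rw [flushA, dif_pos hk, flushA_lt _ _ _ _ _ (by omega),
        show alt - k + 1 = 1 by omega, show ws + B + 1 = (ws + B) + 1 by ring,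
        PySem.List.pyRange_one_singleton]
      (simp; omega)

theorem flushA_ge (B k : Int) : ∀ (ws alt : Int) (acc : List Int), k ≤ alt →
    flushA B k ws alt acc =
      (acc ++ PySem.List.pyRange (ws + B) (ws + B + (alt - k + 1)) 1,
        ws + (alt - k + 1), k - 1) := fun ws alt acc h =>
  flushA_ge_aux B k (alt - k).toNat ws alt acc (by omega) h

theorem scanRun_ne (A : List Int) (i : Nat) (h : scanRun A i ≠ i) :
    i + 1 < A.length ∧ (PySem.Int.bxor (A.getD i 0) (A.getD (i + 1) 0) == 1) = true ∧
      scanRun A (i + 1) = scanRun A i := by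
  by_cases h1 : i + 1 < A.length
  · by_cases h2 : (PySem.Int.bxor (A.getD i 0) (A.getD (i + 1) 0) == 1) = true
    · refine ⟨h1, h2, ?_⟩
      conv_rhs => rw [scanRun]
      rw [dif_pos h1, if_pos h2]
    · exact absurd (by rw [scanRun, dif_pos h1, if_neg h2]) h
  · exact absurd (by rw [scanRun, dif_neg h1]) h

theorem scanRun_lt_aux (A : List Int) : ∀ (d i : Nat), A.length - i ≤ d → i < A.length →
    scanRun A i < A.length := by
  intro d
  induction d with
  | zero => intro i h1 h2; omega
  | succ d ih =>
    intro i hd hi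
    rw [scanRun]
    by_cases h1 : i + 1 < A.length
    · by_cases h2 : (PySem.Int.bxor (A.getD i 0) (A.getD (i + 1) 0) == 1) = true
      · rw [dif_pos h1, if_pos h2]; exact ih (i + 1) (by omega) h1
      · rw [dif_pos h1, if_neg h2]; exact hi
    · rw [dif_neg h1]; exact hi

theorem scanRun_lt (A : List Int) (i : Nat) (h : i < A.length) : scanRun A i < A.length :=
  scanRun_lt_aux A A.length i (by omega) h

theorem scanRun_stop_aux (A : List Int) : ∀ (d i : Nat), A.length - i ≤ d →
    scanRun A i + 1 < A.length →
    (PySem.Int.bxor (A.getD (scanRun A i) 0) (A.getD (scanRun A i + 1) 0) == 1) = false := by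
  intro d
  induction d with
  | zero =>
    intro i hd hs
    have hge := scanRun_ge A i
    have hlt : scanRun A i < A.length := by omega
    omega
  | succ d ih =>
    intro i hd hs
    by_cases h1 : i + 1 < A.length
    · by_cases h2 : (PySem.Int.bxor (A.getD i 0) (A.getD (i + 1) 0) == 1) = true
      · have e : scanRun A i = scanRun A (i + 1) := by
          conv_lhs => rw [scanRun]
          rw [dif_pos h1, if_pos h2]
        rw [e] at hs ⊢
        exact ih (i + 1) (by omega) hs
      · have e : scanRun A i = i := by rw [scanRun, dif_pos h1, if_neg h2]
        rw [e]
        exact Bool.not_eq_true _ ▸ (Bool.eq_false_iff.mpr h2)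
    · have e : scanRun A i = i := by rw [scanRun, dif_neg h1]
      rw [e] at hs
      omega

theorem scanRun_stop (A : List Int) (i : Nat) (h : scanRun A i + 1 < A.length) :
    (PySem.Int.bxor (A.getD (scanRun A i) 0) (A.getD (scanRun A i + 1) 0) == 1) = false :=
  scanRun_stop_aux A A.length i (by omega) h

-- fast-forward A's loop through a maximal alternating run
theorem loopA_ff (A : List Int) (B k : Int) :
    ∀ (d i : Nat) (ws alt : Int) (acc : List Int), scanRun A i - i = d →
    loopA A B k i ws alt acc =
      loopA A B k (scanRun A i) ws
        (if scanRun A i = i then alt else ((scanRun A i : Int) - ws + 1)) acc := by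
  intro d
  induction d with
  | zero =>
    intro i ws alt acc hd
    have e : scanRun A i = i := by have := scanRun_ge A i; omega
    rw [e, if_pos rfl]
  | succ d ih =>
    intro i ws alt acc hd
    have hne : scanRun A i ≠ i := by have := scanRun_ge A i; omega
    obtain ⟨h1, h2, h3⟩ := scanRun_ne A i hne
    conv_lhs => rw [loopA]
    rw [dif_pos (show i < A.length - 1 by omega), if_pos h2,
      ih (i + 1) ws ((i : Int) + 1 - ws + 1) acc (by omega), h3]
    by_cases c : scanRun A i = i + 1
    · rw [if_pos c, if_neg hne, c]
      norm_num
    · rw [if_neg c, if_neg hne]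

-- main invariant: from a fresh run start the flushed A-loop equals B's run loop
theorem main_inv (A : List Int) (B k : Int) (hk : 1 < k) :
    ∀ (d i : Nat) (alt : Int) (acc : List Int), A.length - i ≤ d → alt < k →
    (flushA B k (loopA A B k i (i : Int) alt acc).2.1 (loopA A B k i (i : Int) alt acc).2.2
        (loopA A B k i (i : Int) alt acc).1).1 = runLoop A B k i acc := by
  intro d
  induction d with
  | zero =>
    intro i alt acc hd halt
    rw [loopA, dif_neg (by omega : ¬ i < A.length - 1)]
    rw [flushA_lt _ _ _ _ _ halt, runLoop, dif_neg (by omega : ¬ i < A.length)]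
  | succ d ih =>
    intro i alt acc hd halt
    by_cases hi : i < A.length
    swap
    · rw [loopA, dif_neg (by omega : ¬ i < A.length - 1)]
      rw [flushA_lt _ _ _ _ _ halt, runLoop, dif_neg hi]
    have hij := scanRun_ge A i
    have hjl := scanRun_lt A i hi
    rw [loopA_ff A B k (scanRun A i - i) i (i : Int) alt acc rfl]
    rw [runLoop, dif_pos hi]
    simp only
    by_cases hj1 : scanRun A i < A.length - 1
    case neg =>
      -- the run reaches the end of the array: A's outer loop exits, the final flush fires
      rw [loopA, dif_neg hj1]
      dsimp only
      rw [runLoop, dif_neg (by omega : ¬ scanRun A i + 1 < A.length)]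
      by_cases hE : k ≤ (if scanRun A i = i then alt else ((scanRun A i : Int) - (i : Int) + 1))
      · have hne : scanRun A i ≠ i := by
          intro e; rw [if_pos e] at hE; omega
        rw [if_neg hne] at hE ⊢
        rw [flushA_ge _ _ _ _ _ hE, if_pos hE]
      · by_cases hne : scanRun A i = i
        · rw [if_pos hne] at hE ⊢
          rw [flushA_lt _ _ _ _ _ (by omega), if_neg (by rw [hne]; omega)]
        · rw [if_neg hne] at hE ⊢
          rw [flushA_lt _ _ _ _ _ (by omega), if_neg hE]
    case pos =>
      -- the run ends before the last index: A flushes, resets the window, and continues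
      have hstop := scanRun_stop A i (by omega)
      rw [loopA, dif_pos hj1, if_neg (by rw [hstop]; exact Bool.false_ne_true)]
      dsimp only
      by_cases hE : k ≤ (if scanRun A i = i then alt else ((scanRun A i : Int) - (i : Int) + 1))
      · have hne : scanRun A i ≠ i := by
          intro e; rw [if_pos e] at hE; omega
        rw [if_neg hne] at hE ⊢
        rw [flushA_ge B k (i : Int) ((scanRun A i : Int) - (i : Int) + 1) acc hE]
        dsimp only
        rw [show ((scanRun A i : Int) + 1) = ((scanRun A i + 1 : Nat) : Int) by push_cast; ring]
        rw [ih (scanRun A i + 1) (k - 1)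
          (acc ++ PySem.List.pyRange ((i : Int) + B)
            ((i : Int) + B + ((scanRun A i : Int) - (i : Int) + 1 - k + 1)) 1)
          (by omega) (by omega)]
        rw [if_pos hE]
      · rw [flushA_lt B k (i : Int)
          (if scanRun A i = i then alt else ((scanRun A i : Int) - (i : Int) + 1)) acc
          (by by_cases hne : scanRun A i = i
              · rw [if_pos hne]; exact halt
              · rw [if_neg hne]; omega)]
        dsimp only
        rw [show ((scanRun A i : Int) + 1) = ((scanRun A i + 1 : Nat) : Int) by push_cast; ring]
        rw [ih (scanRun A i + 1) _ acc (by omega) (by omega)]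
        by_cases hne : scanRun A i = i
        · rw [if_neg (show ¬ k ≤ (scanRun A i : Int) - (i : Int) + 1 by rw [hne]; omega)]
        · rw [if_neg hne] at hE
          rw [if_neg hE]

theorem foldl_snoc (l : List Int) : ∀ acc : List Int,
    l.foldl (fun a i => a ++ [i]) acc = acc ++ l := by
  induction l with
  | nil => simp
  | cons x xs ih => intro acc; simp [List.foldl, ih]

-- ===== VERDICT (by name: the statement is the Claim_ definition above) =====
theorem solve_spec : Claim_equal_solve := by
  intro A B _ hB
  unfold Spec_solve solve solve_alt
  by_cases h1 : 2 * B + 1 = 1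
  · simp only [h1, if_pos, foldl_snoc, List.nil_append]
  · simp only [h1, if_false]
    exact main_inv A B (2 * B + 1) (by have : 0 ≤ B := hB; omega) A.length 0 0 [] (by omega)
      (by have : 0 ≤ B := hB; omega)
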